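-- pv_equiv track=rewrite | github.com/devrereg/coding-test | level0/홀수 vs 짝수/solution.py | solution
-- ===== SOURCE A (Python) =====
-- def solution(num_list):
--     sum_even = 0
--     sum_odd = 0
--     for index, num in enumerate(num_list):
--         if index % 2:
--             sum_odd += num
--         else:
--             sum_even += num
--
--     return sum_odd if sum_odd > sum_even else sum_even
-- ===== SOURCE B (Python) =====
-- def solution(num_list):
--     return max(sum(num_list[::2]), sum(num_list[1::2]))
-- ===== Notes on version B (the rewrite author's own statement) =====
-- stated objective: simpler
-- what changed: Replaces the single enumerate loop with a parity branch by two strided-slice sums (num_list[::2] and num_list[1::2]) combined with max, a one-liner with no index bookkeeping; the slicing and sum run in C rather than a per-element Python branch.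
import Mathlib
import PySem

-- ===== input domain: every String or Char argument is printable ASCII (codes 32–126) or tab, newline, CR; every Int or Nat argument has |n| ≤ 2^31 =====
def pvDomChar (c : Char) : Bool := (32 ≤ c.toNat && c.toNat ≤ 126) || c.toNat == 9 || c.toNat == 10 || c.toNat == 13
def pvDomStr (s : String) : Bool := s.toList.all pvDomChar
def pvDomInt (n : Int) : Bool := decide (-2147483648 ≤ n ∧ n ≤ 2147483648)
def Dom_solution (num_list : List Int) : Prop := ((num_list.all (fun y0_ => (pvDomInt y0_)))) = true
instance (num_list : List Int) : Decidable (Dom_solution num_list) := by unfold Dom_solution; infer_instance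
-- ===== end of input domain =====

-- B replaces A's single enumerate loop with a parity branch by two strided-slice sums combined with max (simpler decomposition, same O(n) cost).


-- ===== PORT A =====
-- literal transliteration of A: one fold over enumerate(num_list) with a parity branch,
-- then return sum_odd if sum_odd > sum_even else sum_even
def solution (num_list : List Int) : Int :=
  let p := (PySem.List.enumerate num_list).foldl
    (fun (acc : Int × Int) (iv : Int × Int) =>
      if PySem.Int.mod iv.1 2 ≠ 0 then (acc.1, acc.2 + iv.2) else (acc.1 + iv.2, acc.2))
    ((0 : Int), (0 : Int))
  if p.2 > p.1 then p.2 else p.1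

-- ===== PORT B =====
-- literal transliteration of B: max(sum(num_list[::2]), sum(num_list[1::2]))
def solution_alt (num_list : List Int) : Int :=
  max ((PySem.List.slice? num_list none none 2).getD []).sum
      ((PySem.List.slice? num_list (some 1) none 2).getD []).sum

-- ===== PRECONDITION & SPEC =====
def Spec_solution (num_list : List Int) (out : Int) : Prop := out = solution_alt num_list
instance (num_list : List Int) (out : Int) : Decidable (Spec_solution num_list out) := by unfold Spec_solution; infer_instance

-- ===== CLAIM (what is proved, stated in full; the proofs are below) =====
def Claim_equal_solution : Prop := ∀ (num_list : List Int), Dom_solution num_list → Spec_solution num_list (solution num_list)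

-- ===== LEMMAS AND PROOFS =====

lemma pvFilterMap_eq_map {α β : Type} (l : List α) (f : α → Option β) (g : α → β)
    (h : ∀ a ∈ l, f a = some (g a)) : l.filterMap f = l.map g := by
  induction l with
  | nil => simp
  | cons x xs ih => simp_all

-- elements at even positions / odd positions, structurally
mutual
def pvEvens : List Int → List Int
  | [] => []
  | x :: xs => x :: pvOdds xs
def pvOdds : List Int → List Int
  | [] => []
  | _ :: xs => pvEvens xs
end

lemma pvEvens_length (xs : List Int) : (pvEvens xs).length = (xs.length + 1) / 2 ∧
    (pvOdds xs).length = xs.length / 2 := by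
  induction xs with
  | nil => simp [pvEvens, pvOdds]
  | cons x xs ih => simp [pvEvens, pvOdds, ih.1, ih.2]; omega

lemma pvEvens_get (xs : List Int) : (∀ k : Nat, (pvEvens xs)[k]? = xs[2 * k]?) ∧
    (∀ k : Nat, (pvOdds xs)[k]? = xs[2 * k + 1]?) := by
  induction xs with
  | nil => simp [pvEvens, pvOdds]
  | cons x xs ih =>
    constructor
    · intro k
      cases k with
      | zero => simp [pvEvens]
      | succ n =>
        have h2 : 2 * (n + 1) = (2 * n + 1) + 1 := by omega
        simp [pvEvens, h2, ih.2 n]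
    · intro k
      simpa [pvOdds] using ih.1 k

lemma slice2_eq_evens (xs : List Int) :
    PySem.List.slice? xs none none 2 = some (pvEvens xs) := by
  simp only [PySem.List.slice?, PySem.List.sliceIndices]
  norm_num
  have hc : (if 0 < xs.length then (((xs.length : Int) + 2 - 1) / 2).toNat else 0)
      = (xs.length + 1) / 2 := by split <;> omega
  rw [hc, pvFilterMap_eq_map _ _ (fun k => xs.getD (2 * k) 0) ?_]
  · apply List.ext_getElem
    · simp [(pvEvens_length xs).1]
    · intro i h1 h2
      have hi : i < (xs.length + 1) / 2 := by simpa using h1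
      have h2i : 2 * i < xs.length := by omega
      have := (pvEvens_get xs).1 i
      simp [List.getElem?_eq_getElem h2i] at this
      simp [List.getElem?_eq_some_iff] at this
      obtain ⟨hh, hv⟩ := this
      simp [List.getD, hv, List.getElem?_eq_getElem h2i]
  · intro a ha
    have haa : a < (xs.length + 1) / 2 := List.mem_range.mp ha
    have h2a : 2 * a < xs.length := by omega
    have ht : ((2 * (a : Int)).toNat) = 2 * a := by omega
    simp [ht, List.getD, List.getElem?_eq_getElem h2a]

lemma slice2_eq_odds (xs : List Int) :
    PySem.List.slice? xs (some 1) none 2 = some (pvOdds xs) := by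
  simp only [PySem.List.slice?, PySem.List.sliceIndices]
  norm_num
  have hc : (if 1 < xs.length
      then (((xs.length : Int) - min 1 (xs.length : Int) + 2 - 1) / 2).toNat else 0)
      = xs.length / 2 := by split <;> omega
  rw [hc, pvFilterMap_eq_map _ _ (fun k => xs.getD (2 * k + 1) 0) ?_]
  · apply List.ext_getElem
    · simp [(pvEvens_length xs).2]
    · intro i h1 h2
      have hi : i < xs.length / 2 := by simpa using h1
      have h2i : 2 * i + 1 < xs.length := by omega
      have := (pvEvens_get xs).2 i
      simp [List.getElem?_eq_getElem h2i] at this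
      simp [List.getElem?_eq_some_iff] at this
      obtain ⟨hh, hv⟩ := this
      simp [List.getD, hv, List.getElem?_eq_getElem h2i]
  · intro a ha
    have haa : a < xs.length / 2 := List.mem_range.mp ha
    have h2a : 2 * a + 1 < xs.length := by omega
    have ht : ((min 1 (xs.length : Int) + 2 * (a : Int)).toNat) = 2 * a + 1 := by omega
    simp [ht, List.getD, List.getElem?_eq_getElem h2a]

-- A's loop: folding over enumerate xs s (s ≥ 0) sorts the elements at positions of
-- s's parity into one component and the others into the other.
lemma pvLoop (xs : List Int) : ∀ (s a b : Int), 0 ≤ s →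
    (PySem.List.enumerate xs s).foldl
      (fun (acc : Int × Int) (iv : Int × Int) =>
        if PySem.Int.mod iv.1 2 ≠ 0 then (acc.1, acc.2 + iv.2) else (acc.1 + iv.2, acc.2))
      (a, b)
    = (if s % 2 = 0 then (a + (pvEvens xs).sum, b + (pvOdds xs).sum)
       else (a + (pvOdds xs).sum, b + (pvEvens xs).sum)) := by
  induction xs with
  | nil => intro s a b hs; simp [PySem.List.enumerate_nil, pvEvens, pvOdds]
  | cons x xs ih =>
    intro s a b hs
    rw [PySem.List.enumerate_cons, List.foldl_cons]
    have hmod : PySem.Int.mod s 2 = s % 2 := by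
      simp [PySem.Int.mod, Int.fmod_eq_emod]
    by_cases h : s % 2 = 0
    · simp only [hmod, h]
      rw [ih (s + 1) _ _ (by omega)]
      have : (s + 1) % 2 ≠ 0 := by omega
      simp [this, pvEvens, pvOdds]
      omega
    · simp only [hmod, h]
      rw [ih (s + 1) _ _ (by omega)]
      have : (s + 1) % 2 = 0 := by omega
      have h1 : s % 2 = 1 := by omega
      simp [this, h1, pvEvens, pvOdds]
      omega

-- ===== VERDICT (by name: the statement is the Claim_ definition above) =====
theorem solution_spec : Claim_equal_solution := by
  intro num_list _
  unfold Spec_solution solution solution_alt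
  rw [slice2_eq_evens, slice2_eq_odds]
  rw [pvLoop num_list 0 0 0 le_rfl]
  simp [max_def]
  split <;> split <;> omega
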